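-- pv_equiv track=rewrite | github.com/nashspence/scripts | fitdisk.py | _plan_groups
-- ===== SOURCE A (Python) =====
-- from typing import Iterable, List, Optional, Sequence, Tuple
--
-- def _plan_groups(
--     files: Sequence[Tuple[str, int]], target_bytes: int
-- ) -> List[List[Tuple[str, int]]]:
--     groups: List[List[Tuple[str, int]]] = []
--     current: List[Tuple[str, int]] = []
--     current_size = 0
--     for item in files:
--         path, size = item
--         if current and current_size + size > target_bytes:
--             groups.append(current)
--             current = []
--             current_size = 0
--         current.append(item)
--         current_size += size
--     if current:
--         groups.append(current)
--     return groups
-- ===== SOURCE B (Python) =====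
-- from typing import List, Sequence, Tuple
--
-- def _plan_groups(
--     files: Sequence[Tuple[str, int]], target_bytes: int
-- ) -> List[List[Tuple[str, int]]]:
--     # Stage 1: plan only the group LENGTHS with a purely numeric scan
--     # (no tuples are collected here, just a count and a running size).
--     lens: List[int] = []
--     cnt = 0
--     acc = 0
--     for path, size in files:
--         if cnt and acc + size > target_bytes:
--             lens.append(cnt)
--             cnt, acc = 0, 0
--         cnt += 1
--         acc += size
--     if cnt:
--         lens.append(cnt)
--     # Stage 2: materialize the groups by slicing the input per planned length.
--     groups: List[List[Tuple[str, int]]] = []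
--     rest = list(files)
--     for m in lens:
--         groups.append(rest[:m])
--         rest = rest[m:]
--     return groups
-- ===== Notes on version B (the rewrite author's own statement) =====
-- stated objective: alternative
-- what changed: Replaced A's single pass that collects tuples into a growing current group and flushes it on overflow with a two-stage plan/materialize design: stage 1 is a purely numeric scan producing only the list of group lengths, stage 2 slices the input list into groups according to those lengths; no group of tuples is ever built during the scan.
import Mathlib
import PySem

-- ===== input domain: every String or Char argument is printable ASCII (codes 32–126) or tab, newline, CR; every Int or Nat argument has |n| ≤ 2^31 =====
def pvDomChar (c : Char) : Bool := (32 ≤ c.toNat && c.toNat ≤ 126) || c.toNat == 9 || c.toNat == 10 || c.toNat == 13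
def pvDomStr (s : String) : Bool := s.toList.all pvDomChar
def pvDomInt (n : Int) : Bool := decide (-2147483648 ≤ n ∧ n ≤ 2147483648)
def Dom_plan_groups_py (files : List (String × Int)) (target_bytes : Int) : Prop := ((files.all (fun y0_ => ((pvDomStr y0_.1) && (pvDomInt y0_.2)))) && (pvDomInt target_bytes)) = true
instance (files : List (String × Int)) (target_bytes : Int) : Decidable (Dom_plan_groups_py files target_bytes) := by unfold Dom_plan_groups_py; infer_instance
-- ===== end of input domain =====

-- B replaces A's single collect-and-flush pass by a two-stage plan/materialize design:
-- a numeric scan computes the group lengths, then the input is sliced per length (alternative, same cost).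

-- ===== PORT A =====
-- A's for-loop over files carrying (groups, current, current_size), flushing on overflow.
def pvLoopA (target_bytes : Int) : List (String × Int) → List (List (String × Int)) → List (String × Int) → Int → List (List (String × Int))
  | [], groups, current, _ =>
      if current ≠ [] then groups ++ [current] else groups
  | (path, size) :: rest, groups, current, current_size =>
      if current ≠ [] ∧ current_size + size > target_bytes then
        pvLoopA target_bytes rest (groups ++ [current]) [(path, size)] size
      else
        pvLoopA target_bytes rest groups (current ++ [(path, size)]) (current_size + size)

def plan_groups_py (files : List (String × Int)) (target_bytes : Int) : List (List (String × Int)) :=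
  pvLoopA target_bytes files [] [] 0

-- ===== PORT B =====
-- Stage 1 of B: the numeric scan producing the planned group lengths (state: lens, cnt, acc).
def pvLensLoop (target_bytes : Int) : List (String × Int) → List Int → Int → Int → List Int
  | [], lens, cnt, _ =>
      if cnt ≠ 0 then lens ++ [cnt] else lens
  | (_path, size) :: rest, lens, cnt, acc =>
      let st := if cnt ≠ 0 ∧ acc + size > target_bytes then (lens ++ [cnt], (0 : Int), (0 : Int)) else (lens, cnt, acc)
      pvLensLoop target_bytes rest st.1 (st.2.1 + 1) (st.2.2 + size)

-- Stage 2 of B: slice the input per planned length (rest[:m], rest = rest[m:]).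
def pvSplitLoop : List Int → List (String × Int) → List (List (String × Int)) → List (List (String × Int))
  | [], _, groups => groups
  | m :: ms, rest, groups =>
      pvSplitLoop ms (PySem.List.slice rest (some m) none) (groups ++ [PySem.List.slice rest none (some m)])

def plan_groups_py_alt (files : List (String × Int)) (target_bytes : Int) : List (List (String × Int)) :=
  pvSplitLoop (pvLensLoop target_bytes files [] 0 0) files []

-- ===== PRECONDITION & SPEC =====
def Spec_plan_groups_py (files : List (String × Int)) (target_bytes : Int) (out : List (List (String × Int))) : Prop := out = plan_groups_py_alt files target_bytes
instance (files : List (String × Int)) (target_bytes : Int) (out : List (List (String × Int))) : Decidable (Spec_plan_groups_py files target_bytes out) := by unfold Spec_plan_groups_py; infer_instance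

-- ===== CLAIM =====
def Claim_equal_plan_groups_py : Prop := ∀ (files : List (String × Int)) (target_bytes : Int), Dom_plan_groups_py files target_bytes → Spec_plan_groups_py files target_bytes (plan_groups_py files target_bytes)

-- ===== LEMMAS AND PROOFS =====

-- The lens accumulator is only ever appended to.
theorem pvLensLoop_acc (target_bytes : Int) :
    ∀ (rest : List (String × Int)) (lens : List Int) (cnt acc : Int),
      pvLensLoop target_bytes rest lens cnt acc =
        lens ++ pvLensLoop target_bytes rest [] cnt acc := by
  intro rest
  induction rest with
  | nil =>
      intro lens cnt acc
      by_cases h : cnt ≠ 0 <;> simp [pvLensLoop, h]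
  | cons x rest ih =>
      intro lens cnt acc
      obtain ⟨p, s⟩ := x
      simp only [pvLensLoop]
      by_cases h : cnt ≠ 0 ∧ acc + s > target_bytes
      · simp only [if_pos h, zero_add, List.nil_append]
        rw [ih (lens ++ [cnt]) 1 s, ih [cnt] 1 s]
        simp
      · simp only [if_neg h]
        exact ih lens (cnt + 1) (acc + s)

-- Slicing off a prefix of known natural length.
theorem slice_take_len (current rest : List (String × Int)) :
    PySem.List.slice (current ++ rest) none (some (current.length : Int)) = current := by
  rw [PySem.List.slice_to_natCast]
  simp

theorem slice_drop_len (current rest : List (String × Int)) :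
    PySem.List.slice (current ++ rest) (some (current.length : Int)) none = rest := by
  rw [PySem.List.slice_from_natCast]
  simp

-- Key invariant: A's remaining scan with pending group `current` equals B's split of the
-- remaining lengths over `current ++ rest`, provided cnt counts `current`.
theorem pvLoopA_eq_split (target_bytes : Int) :
    ∀ (rest : List (String × Int)) (groups : List (List (String × Int)))
      (current : List (String × Int)) (cs : Int),
      pvLoopA target_bytes rest groups current cs =
        pvSplitLoop (pvLensLoop target_bytes rest [] (current.length : Int) cs)
          (current ++ rest) groups := by
  intro rest
  induction rest with
  | nil =>
      intro groups current cs
      by_cases h : current = []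
      · subst h; simp [pvLoopA, pvLensLoop, pvSplitLoop]
      · have hc : ((current.length : Int) ≠ 0) := by
          simp [h]
        simp only [pvLoopA, pvLensLoop, if_pos hc, if_pos h, List.append_nil, List.nil_append]
        have e1 := slice_take_len current []
        have e2 := slice_drop_len current []
        simp only [List.append_nil] at e1 e2
        rw [pvSplitLoop, e1, e2]
        simp [pvSplitLoop]
  | cons x rest ih =>
      intro groups current cs
      obtain ⟨p, s⟩ := x
      simp only [pvLoopA, pvLensLoop]
      by_cases h : current ≠ [] ∧ cs + s > target_bytes
      · have hc : ((current.length : Int) ≠ 0 ∧ cs + s > target_bytes) := by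
          refine ⟨?_, h.2⟩
          simp [h.1]
        simp only [if_pos h, if_pos hc]
        rw [ih (groups ++ [current]) [(p, s)] s]
        simp only [List.length_cons, List.length_nil, zero_add, List.nil_append, Nat.cast_one]
        rw [pvLensLoop_acc target_bytes rest [(current.length : Int)] 1 s]
        have hsplit :
            pvSplitLoop ((current.length : Int) :: pvLensLoop target_bytes rest [] 1 s)
              (current ++ (p, s) :: rest) groups =
            pvSplitLoop (pvLensLoop target_bytes rest [] 1 s) ((p, s) :: rest)
              (groups ++ [current]) := by
          have e1 := slice_take_len current ((p, s) :: rest)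
          have e2 := slice_drop_len current ((p, s) :: rest)
          simp only [pvSplitLoop, e1, e2]
        simpa using hsplit.symm
      · have hc : ¬ ((current.length : Int) ≠ 0 ∧ cs + s > target_bytes) := by
          intro hcc
          apply h
          refine ⟨?_, hcc.2⟩
          intro he
          subst he
          simp at hcc
        simp only [if_neg h, if_neg hc]
        have := ih groups (current ++ [(p, s)]) (cs + s)
        simp only [List.length_append, List.length_cons, List.length_nil] at this
        have hlen : ((current.length : Int) + 1) = (((current.length + 1 : Nat)) : Int) := by
          push_cast; ring
        rw [hlen]
        simpa [List.append_assoc] using this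

-- ===== VERDICT =====
theorem plan_groups_py_spec : Claim_equal_plan_groups_py := by
  intro files target_bytes _
  unfold Spec_plan_groups_py plan_groups_py plan_groups_py_alt
  have := pvLoopA_eq_split target_bytes files [] [] 0
  simpa using this
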